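-- pv_equiv track=rewrite | github.com/tech-kev/SharedMoments | app/migration/migrator.py | _strip_upload_prefix
-- ===== SOURCE A (Python) =====
-- def _strip_upload_prefix(url):
--     """Strip v1 upload path prefixes from contentURL."""
--     if not url:
--         return ''
--     prefixes = [
--         './upload/feed_items/', './upload/stock_items/',
--         '/upload/feed_items/', '/upload/stock_items/',
--         'upload/feed_items/', 'upload/stock_items/',
--     ]
--     for prefix in prefixes:
--         if url.startswith(prefix):
--             return url[len(prefix):]
--     return url
-- ===== SOURCE B (Python) =====
-- def _strip_upload_prefix(url):
--     """Strip v1 upload path prefixes from contentURL."""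
--     if not url:
--         return ''
--     if url.startswith('./'):
--         rest = url[2:]
--     elif url.startswith('/'):
--         rest = url[1:]
--     else:
--         rest = url
--     if rest.startswith('upload/'):
--         body = rest[7:]
--         if body.startswith('feed_items/'):
--             return body[11:]
--         if body.startswith('stock_items/'):
--             return body[12:]
--     return url
-- ===== Notes on version B (the rewrite author's own statement) =====
-- stated objective: simpler
-- what changed: Replaces the 6-entry prefix list and linear scan with componentwise parsing: peel an optional leading dot-slash or slash, then match the upload directory, then the feed/stock item directory, composing the matched lengths instead of testing whole concatenated prefixes.
import Mathlib
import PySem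

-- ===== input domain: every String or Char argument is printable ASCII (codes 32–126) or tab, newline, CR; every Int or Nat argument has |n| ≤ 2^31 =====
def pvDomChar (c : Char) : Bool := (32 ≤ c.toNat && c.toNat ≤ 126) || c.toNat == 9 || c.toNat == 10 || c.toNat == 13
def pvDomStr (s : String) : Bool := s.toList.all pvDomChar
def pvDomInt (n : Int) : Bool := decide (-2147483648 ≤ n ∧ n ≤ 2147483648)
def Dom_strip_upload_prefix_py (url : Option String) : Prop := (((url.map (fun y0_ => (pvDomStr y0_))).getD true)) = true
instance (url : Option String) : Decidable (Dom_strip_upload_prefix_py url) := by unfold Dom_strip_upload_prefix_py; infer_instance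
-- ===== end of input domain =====

-- B replaces A's 6-entry prefix list and scan by componentwise parsing (optional './' or '/',
-- then 'upload/', then the item directory), composing the matched lengths; objective: simpler.

-- ===== PORT A =====
-- the 'for prefix in prefixes' loop, returning url[len(prefix):] on the first match
def pvStripLoop (u : String) : List String → String
  | [] => u
  | p :: ps =>
    if PySem.Str.startswith u p then PySem.Str.slice u (some (PySem.Str.len p)) none
    else pvStripLoop u ps

def strip_upload_prefix_py (url : Option String) : String :=
  match url with
  | none => ""
  | some u =>
    if u.toList = [] then ""   -- 'if not url' on a string: falsy iff empty
    else pvStripLoop u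
      ["./upload/feed_items/", "./upload/stock_items/",
       "/upload/feed_items/", "/upload/stock_items/",
       "upload/feed_items/", "upload/stock_items/"]

-- ===== PORT B =====
def strip_upload_prefix_py_alt (url : Option String) : String :=
  match url with
  | none => ""
  | some u =>
    if u.toList = [] then ""   -- 'if not url'
    else
      let rest :=
        if PySem.Str.startswith u "./" then PySem.Str.slice u (some 2) none
        else if PySem.Str.startswith u "/" then PySem.Str.slice u (some 1) none
        else u
      if PySem.Str.startswith rest "upload/" then
        let body := PySem.Str.slice rest (some 7) none
        if PySem.Str.startswith body "feed_items/" then PySem.Str.slice body (some 11) none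
        else if PySem.Str.startswith body "stock_items/" then PySem.Str.slice body (some 12) none
        else u
      else u

-- ===== PRECONDITION & SPEC =====
def Spec_strip_upload_prefix_py (url : Option String) (out : String) : Prop := out = strip_upload_prefix_py_alt url
instance (url : Option String) (out : String) : Decidable (Spec_strip_upload_prefix_py url out) := by unfold Spec_strip_upload_prefix_py; infer_instance

-- ===== CLAIM (what is proved, stated in full; the proofs are below) =====
def Claim_equal_strip_upload_prefix_py : Prop := ∀ (url : Option String), Dom_strip_upload_prefix_py url → Spec_strip_upload_prefix_py url (strip_upload_prefix_py url)

-- ===== LEMMAS AND PROOFS =====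

-- splitting a concatenated prefix into its two parts
theorem pv_prefix_append_iff (s p q : List Char) :
    p ++ q <+: s ↔ p <+: s ∧ q <+: s.drop p.length := by
  constructor
  · intro h
    obtain ⟨t, ht⟩ := h
    subst ht
    exact ⟨⟨q ++ t, by simp⟩, ⟨t, by simp⟩⟩
  · rintro ⟨⟨t, ht⟩, ⟨t2, ht2⟩⟩
    refine ⟨t2, ?_⟩
    subst ht
    simp_all

theorem pv_startswith_decide (u p : String) :
    PySem.Str.startswith u p = decide (p.toList <+: u.toList) := by
  rw [PySem.Str.startswith_eq]
  by_cases h : p.toList <+: u.toList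
  · simp [h, (PySem.Chars.startswith_iff _ _).mpr h]
  · simp only [h, decide_false]
    by_contra hb
    exact h ((PySem.Chars.startswith_iff _ _).mp (by revert hb; cases PySem.Chars.startswith u.toList p.toList <;> simp))

-- ===== VERDICT (by name: the statement is the Claim_ definition above) =====
set_option maxHeartbeats 2000000 in
theorem strip_upload_prefix_py_spec : Claim_equal_strip_upload_prefix_py := by
  intro url _
  unfold Spec_strip_upload_prefix_py
  match url with
  | none => rfl
  | some u =>
    by_cases hnil : u.toList = []
    · simp [strip_upload_prefix_py, strip_upload_prefix_py_alt, hnil]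
    · apply String.toList_inj.mp
      simp only [strip_upload_prefix_py, strip_upload_prefix_py_alt, hnil,
        pvStripLoop, pv_startswith_decide]
      -- case on the six prefixes of A in order
      by_cases h1 : "./upload/feed_items/".toList <+: u.toList
      · obtain ⟨t, ht⟩ := h1
        simp [pysem, ← ht, List.cons_prefix_cons, PySem.Str.len]
      by_cases h2 : "./upload/stock_items/".toList <+: u.toList
      · obtain ⟨t, ht⟩ := h2
        simp [pysem, ← ht, List.cons_prefix_cons, PySem.Str.len]
      by_cases h3 : "/upload/feed_items/".toList <+: u.toList
      · obtain ⟨t, ht⟩ := h3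
        simp [pysem, ← ht, List.cons_prefix_cons, PySem.Str.len]
      by_cases h4 : "/upload/stock_items/".toList <+: u.toList
      · obtain ⟨t, ht⟩ := h4
        simp [pysem, ← ht, List.cons_prefix_cons, PySem.Str.len]
      by_cases h5 : "upload/feed_items/".toList <+: u.toList
      · obtain ⟨t, ht⟩ := h5
        simp [pysem, ← ht, List.cons_prefix_cons, PySem.Str.len]
      by_cases h6 : "upload/stock_items/".toList <+: u.toList
      · obtain ⟨t, ht⟩ := h6
        simp [pysem, ← ht, List.cons_prefix_cons, PySem.Str.len]
      -- no prefix matches: B's nested tests cannot all succeed either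
      · by_cases hD : ['.', '/'] <+: u.toList
        · obtain ⟨t, ht⟩ := hD
          by_cases hU : (['u','p','l','o','a','d','/'] : List Char) <+: t
          · by_cases hf : (['f','e','e','d','_','i','t','e','m','s','/'] : List Char) <+: t.drop 7
            · refine absurd ?_ h1
              rw [← ht, show ("./upload/feed_items/".toList)
                    = ['.', '/'] ++ (['u','p','l','o','a','d','/'] ++ ['f','e','e','d','_','i','t','e','m','s','/']) by decide]
              exact (List.prefix_append_right_inj _).mpr
                ((pv_prefix_append_iff t _ _).mpr ⟨hU, by simpa using hf⟩)
            by_cases hs : (['s','t','o','c','k','_','i','t','e','m','s','/'] : List Char) <+: t.drop 7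
            · refine absurd ?_ h2
              rw [← ht, show ("./upload/stock_items/".toList)
                    = ['.', '/'] ++ (['u','p','l','o','a','d','/'] ++ ['s','t','o','c','k','_','i','t','e','m','s','/']) by decide]
              exact (List.prefix_append_right_inj _).mpr
                ((pv_prefix_append_iff t _ _).mpr ⟨hU, by simpa using hs⟩)
            · have hA1 : ¬ ((['u','p','l','o','a','d','/','f','e','e','d','_','i','t','e','m','s','/'] : List Char) <+: t) := by
                rw [show ((['u','p','l','o','a','d','/','f','e','e','d','_','i','t','e','m','s','/']) : List Char) = ['u','p','l','o','a','d','/'] ++ ['f','e','e','d','_','i','t','e','m','s','/'] by decide, pv_prefix_append_iff]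
                simp [hf]
              have hA2 : ¬ ((['u','p','l','o','a','d','/','s','t','o','c','k','_','i','t','e','m','s','/'] : List Char) <+: t) := by
                rw [show ((['u','p','l','o','a','d','/','s','t','o','c','k','_','i','t','e','m','s','/']) : List Char) = ['u','p','l','o','a','d','/'] ++ ['s','t','o','c','k','_','i','t','e','m','s','/'] by decide, pv_prefix_append_iff]
                simp [hs]
              simp [PySem.Str.toList_slice, PySem.Chars.slice_eq_listSlice, PySem.List.slice_from, List.cons_prefix_cons, ← ht, hU, hf, hs, hA1, hA2]
          · have hA1 : ¬ ((['u','p','l','o','a','d','/','f','e','e','d','_','i','t','e','m','s','/'] : List Char) <+: t) := by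
              rw [show ((['u','p','l','o','a','d','/','f','e','e','d','_','i','t','e','m','s','/']) : List Char) = ['u','p','l','o','a','d','/'] ++ ['f','e','e','d','_','i','t','e','m','s','/'] by decide, pv_prefix_append_iff]
              simp [hU]
            have hA2 : ¬ ((['u','p','l','o','a','d','/','s','t','o','c','k','_','i','t','e','m','s','/'] : List Char) <+: t) := by
              rw [show ((['u','p','l','o','a','d','/','s','t','o','c','k','_','i','t','e','m','s','/']) : List Char) = ['u','p','l','o','a','d','/'] ++ ['s','t','o','c','k','_','i','t','e','m','s','/'] by decide, pv_prefix_append_iff]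
              simp [hU]
            simp [PySem.Str.toList_slice, PySem.Chars.slice_eq_listSlice, PySem.List.slice_from, List.cons_prefix_cons, ← ht, hU, hA1, hA2]
        by_cases hS : ['/'] <+: u.toList
        · obtain ⟨t, ht⟩ := hS
          by_cases hU : (['u','p','l','o','a','d','/'] : List Char) <+: t
          · by_cases hf : (['f','e','e','d','_','i','t','e','m','s','/'] : List Char) <+: t.drop 7
            · refine absurd ?_ h3
              rw [← ht, show ("/upload/feed_items/".toList)
                    = ['/'] ++ (['u','p','l','o','a','d','/'] ++ ['f','e','e','d','_','i','t','e','m','s','/']) by decide]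
              exact (List.prefix_append_right_inj _).mpr
                ((pv_prefix_append_iff t _ _).mpr ⟨hU, by simpa using hf⟩)
            by_cases hs : (['s','t','o','c','k','_','i','t','e','m','s','/'] : List Char) <+: t.drop 7
            · refine absurd ?_ h4
              rw [← ht, show ("/upload/stock_items/".toList)
                    = ['/'] ++ (['u','p','l','o','a','d','/'] ++ ['s','t','o','c','k','_','i','t','e','m','s','/']) by decide]
              exact (List.prefix_append_right_inj _).mpr
                ((pv_prefix_append_iff t _ _).mpr ⟨hU, by simpa using hs⟩)
            · have hA1 : ¬ ((['u','p','l','o','a','d','/','f','e','e','d','_','i','t','e','m','s','/'] : List Char) <+: t) := by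
                rw [show ((['u','p','l','o','a','d','/','f','e','e','d','_','i','t','e','m','s','/']) : List Char) = ['u','p','l','o','a','d','/'] ++ ['f','e','e','d','_','i','t','e','m','s','/'] by decide, pv_prefix_append_iff]
                simp [hf]
              have hA2 : ¬ ((['u','p','l','o','a','d','/','s','t','o','c','k','_','i','t','e','m','s','/'] : List Char) <+: t) := by
                rw [show ((['u','p','l','o','a','d','/','s','t','o','c','k','_','i','t','e','m','s','/']) : List Char) = ['u','p','l','o','a','d','/'] ++ ['s','t','o','c','k','_','i','t','e','m','s','/'] by decide, pv_prefix_append_iff]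
                simp [hs]
              simp [PySem.Str.toList_slice, PySem.Chars.slice_eq_listSlice, PySem.List.slice_from, List.cons_prefix_cons, ← ht, hU, hf, hs, hA1, hA2]
          · have hA1 : ¬ ((['u','p','l','o','a','d','/','f','e','e','d','_','i','t','e','m','s','/'] : List Char) <+: t) := by
              rw [show ((['u','p','l','o','a','d','/','f','e','e','d','_','i','t','e','m','s','/']) : List Char) = ['u','p','l','o','a','d','/'] ++ ['f','e','e','d','_','i','t','e','m','s','/'] by decide, pv_prefix_append_iff]
              simp [hU]
            have hA2 : ¬ ((['u','p','l','o','a','d','/','s','t','o','c','k','_','i','t','e','m','s','/'] : List Char) <+: t) := by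
              rw [show ((['u','p','l','o','a','d','/','s','t','o','c','k','_','i','t','e','m','s','/']) : List Char) = ['u','p','l','o','a','d','/'] ++ ['s','t','o','c','k','_','i','t','e','m','s','/'] by decide, pv_prefix_append_iff]
              simp [hU]
            simp [PySem.Str.toList_slice, PySem.Chars.slice_eq_listSlice, PySem.List.slice_from, List.cons_prefix_cons, ← ht, hU, hA1, hA2]
        · -- url starts with neither './' nor '/'
          have hB1 : ¬ (('.' :: '/' :: ['u','p','l','o','a','d','/','f','e','e','d','_','i','t','e','m','s','/'] : List Char) <+: u.toList) := by
            rw [show (('.' :: '/' :: ['u','p','l','o','a','d','/','f','e','e','d','_','i','t','e','m','s','/']) : List Char) = ['.','/'] ++ ['u','p','l','o','a','d','/','f','e','e','d','_','i','t','e','m','s','/'] by decide, pv_prefix_append_iff]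
            simp [hD]
          have hB2 : ¬ (('.' :: '/' :: ['u','p','l','o','a','d','/','s','t','o','c','k','_','i','t','e','m','s','/'] : List Char) <+: u.toList) := by
            rw [show (('.' :: '/' :: ['u','p','l','o','a','d','/','s','t','o','c','k','_','i','t','e','m','s','/']) : List Char) = ['.','/'] ++ ['u','p','l','o','a','d','/','s','t','o','c','k','_','i','t','e','m','s','/'] by decide, pv_prefix_append_iff]
            simp [hD]
          have hB3 : ¬ (('/' :: ['u','p','l','o','a','d','/','f','e','e','d','_','i','t','e','m','s','/'] : List Char) <+: u.toList) := by
            rw [show (('/' :: ['u','p','l','o','a','d','/','f','e','e','d','_','i','t','e','m','s','/']) : List Char) = ['/'] ++ ['u','p','l','o','a','d','/','f','e','e','d','_','i','t','e','m','s','/'] by decide, pv_prefix_append_iff]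
            simp [hS]
          have hB4 : ¬ (('/' :: ['u','p','l','o','a','d','/','s','t','o','c','k','_','i','t','e','m','s','/'] : List Char) <+: u.toList) := by
            rw [show (('/' :: ['u','p','l','o','a','d','/','s','t','o','c','k','_','i','t','e','m','s','/']) : List Char) = ['/'] ++ ['u','p','l','o','a','d','/','s','t','o','c','k','_','i','t','e','m','s','/'] by decide, pv_prefix_append_iff]
            simp [hS]
          by_cases hU : (['u','p','l','o','a','d','/'] : List Char) <+: u.toList
          · by_cases hf : (['f','e','e','d','_','i','t','e','m','s','/'] : List Char) <+: u.toList.drop 7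
            · refine absurd ?_ h5
              rw [show ("upload/feed_items/".toList) = ['u','p','l','o','a','d','/'] ++ ['f','e','e','d','_','i','t','e','m','s','/'] by decide]
              exact (pv_prefix_append_iff u.toList _ _).mpr ⟨hU, by simpa using hf⟩
            by_cases hs : (['s','t','o','c','k','_','i','t','e','m','s','/'] : List Char) <+: u.toList.drop 7
            · refine absurd ?_ h6
              rw [show ("upload/stock_items/".toList) = ['u','p','l','o','a','d','/'] ++ ['s','t','o','c','k','_','i','t','e','m','s','/'] by decide]
              exact (pv_prefix_append_iff u.toList _ _).mpr ⟨hU, by simpa using hs⟩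
            · have hA1 : ¬ ((['u','p','l','o','a','d','/','f','e','e','d','_','i','t','e','m','s','/'] : List Char) <+: u.toList) := by
                rw [show ((['u','p','l','o','a','d','/','f','e','e','d','_','i','t','e','m','s','/']) : List Char) = ['u','p','l','o','a','d','/'] ++ ['f','e','e','d','_','i','t','e','m','s','/'] by decide, pv_prefix_append_iff]
                simp [hf]
              have hA2 : ¬ ((['u','p','l','o','a','d','/','s','t','o','c','k','_','i','t','e','m','s','/'] : List Char) <+: u.toList) := by
                rw [show ((['u','p','l','o','a','d','/','s','t','o','c','k','_','i','t','e','m','s','/']) : List Char) = ['u','p','l','o','a','d','/'] ++ ['s','t','o','c','k','_','i','t','e','m','s','/'] by decide, pv_prefix_append_iff]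
                simp [hs]
              simp [PySem.Str.toList_slice, PySem.Chars.slice_eq_listSlice, PySem.List.slice_from, hD, hS, hU, hf, hs, hA1, hA2, hB1, hB2, hB3, hB4]
          · have hA1 : ¬ ((['u','p','l','o','a','d','/','f','e','e','d','_','i','t','e','m','s','/'] : List Char) <+: u.toList) := by
              rw [show ((['u','p','l','o','a','d','/','f','e','e','d','_','i','t','e','m','s','/']) : List Char) = ['u','p','l','o','a','d','/'] ++ ['f','e','e','d','_','i','t','e','m','s','/'] by decide, pv_prefix_append_iff]
              simp [hU]
            have hA2 : ¬ ((['u','p','l','o','a','d','/','s','t','o','c','k','_','i','t','e','m','s','/'] : List Char) <+: u.toList) := by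
              rw [show ((['u','p','l','o','a','d','/','s','t','o','c','k','_','i','t','e','m','s','/']) : List Char) = ['u','p','l','o','a','d','/'] ++ ['s','t','o','c','k','_','i','t','e','m','s','/'] by decide, pv_prefix_append_iff]
              simp [hU]
            simp [hD, hS, hU, hA1, hA2, hB1, hB2, hB3, hB4]
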